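-- pv_equiv track=rewrite | github.com/cherab/imas | src/cherab/imas/plasma/utility.py | get_subset_name_index
-- ===== SOURCE A (Python) =====
-- def get_subset_name_index(subset_id_dict: dict, grid_subset_id: int | str) -> tuple[str, int]:
--     """Get the name and index of a grid subset from its identifier.
--
--     Parameters
--     ----------
--     subset_id_dict
--         Dictionary with grid subset indices.
--     grid_subset_id
--         Identifier of the grid subset. Either index or name.
--
--     Returns
--     -------
--     grid_subset_name
--         Name of the grid subset.
--     grid_subset_index
--         Index of the grid subset.
--
--     Raises
--     ------
--     ValueError
--         If the grid subset with the given identifier is not found.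
--     """
--     subset_id = subset_id_dict.copy()
--     subset_id.update({value: key for key, value in subset_id.items()})
--
--     try:
--         grid_subset_index = int(grid_subset_id)
--         grid_subset_name = subset_id[grid_subset_index]
--     except ValueError as err1:
--         try:
--             grid_subset_name = str(grid_subset_id)
--             grid_subset_index = subset_id[grid_subset_name]
--         except KeyError:
--             raise ValueError(f"Unable to find a grid subset with ID {grid_subset_id}.") from err1
--     except KeyError as err2:
--         raise ValueError(f"Unable to find a grid subset with ID {grid_subset_id}.") from err2
--
--     return grid_subset_name, grid_subset_index
-- ===== SOURCE B (Python) =====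
-- def get_subset_name_index(subset_id_dict: dict, grid_subset_id) -> tuple:
--     """Resolve a grid subset (name, index) from an identifier, which may be an
--     index or a name, by scanning the dictionary once."""
--     try:
--         index = int(grid_subset_id)
--     except ValueError:
--         name = str(grid_subset_id)
--         if name in subset_id_dict:
--             return name, subset_id_dict[name]
--     else:
--         for name, value in subset_id_dict.items():
--             if value == index:
--                 return name, index
--     raise ValueError(f"Unable to find a grid subset with ID {grid_subset_id}.")
-- ===== Notes on version B (the rewrite author's own statement) =====
-- stated objective: simpler
-- what changed: B drops A's dict copy and merged reversed-dict construction: an integer id is resolved by a single forward scan of the items for a key with that value, a name id by a direct key lookup; Pre_ excludes the inputs where A raises ValueError (id not found) and integer ids matching a value held by more than one key, where A's merged-dict overwrite picks a key by accidental reinsertion order.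
-- outside the precondition, e.g. on get_subset_name_index({'a': 1, 'b': 1}, '1'): A returns ('b', 1), B returns ('a', 1)
import Mathlib
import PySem

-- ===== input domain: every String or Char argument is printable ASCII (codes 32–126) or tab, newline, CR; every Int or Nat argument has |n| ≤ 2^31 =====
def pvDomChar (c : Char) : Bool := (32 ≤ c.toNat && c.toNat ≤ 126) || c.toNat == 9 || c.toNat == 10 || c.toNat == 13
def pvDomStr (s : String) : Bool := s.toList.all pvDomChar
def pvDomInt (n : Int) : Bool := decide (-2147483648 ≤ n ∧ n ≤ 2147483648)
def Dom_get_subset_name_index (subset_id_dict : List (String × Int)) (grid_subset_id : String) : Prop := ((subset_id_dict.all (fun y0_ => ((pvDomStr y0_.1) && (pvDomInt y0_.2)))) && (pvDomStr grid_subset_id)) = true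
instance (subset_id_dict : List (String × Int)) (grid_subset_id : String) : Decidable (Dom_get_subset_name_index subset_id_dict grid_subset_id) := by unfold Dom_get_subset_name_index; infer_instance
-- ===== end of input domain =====

-- B drops A's dict copy + merged reversed-dict construction: one forward pass over the
-- items for an integer id, a direct key lookup for a name id (simpler).

-- ===== PORT A =====
-- A builds a merged dict {**d, **{value: key}}; its String keys and Int keys can never
-- collide, so the merged dict is modelled exactly by the original dict (String keys)
-- plus the reversed dict (Int keys), each looked up with the matching key type.
def get_subset_name_index (subset_id_dict : List (String × Int)) (grid_subset_id : String) : String × Int :=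
  let d : PySem.Dict String Int := PySem.Dict.ofList subset_id_dict
  let rev : PySem.Dict Int String := d.items.foldl (fun acc p => acc.insert p.2 p.1) PySem.Dict.empty
  match PySem.Int.ofStr? grid_subset_id with
  | some n =>                                  -- int(grid_subset_id) succeeded
    match rev.get? n with
    | some name => (name, n)
    | none => ("", 0)                          -- KeyError → ValueError; excluded by Pre_
  | none =>                                    -- int(...) raised ValueError
    match d.get? grid_subset_id with
    | some idx => (grid_subset_id, idx)
    | none => ("", 0)                          -- KeyError → ValueError; excluded by Pre_

-- ===== PORT B =====
-- the `for name, value in subset_id_dict.items()` loop of Source B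
def pvScanItems : List (String × Int) → Int → Option String
  | [], _ => none
  | p :: rest, index => if p.2 = index then some p.1 else pvScanItems rest index

def get_subset_name_index_alt (subset_id_dict : List (String × Int)) (grid_subset_id : String) : String × Int :=
  let d : PySem.Dict String Int := PySem.Dict.ofList subset_id_dict
  match PySem.Int.ofStr? grid_subset_id with
  | some index =>
    match pvScanItems d.items index with
    | some name => (name, index)
    | none => ("", 0)                          -- raise ValueError; excluded by Pre_
  | none =>
    if d.contains grid_subset_id then (grid_subset_id, d.getD grid_subset_id 0)
    else ("", 0)                               -- raise ValueError; excluded by Pre_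

-- ===== PRECONDITION & SPEC =====
-- Pre_ excludes the inputs on which A raises ValueError (id not found), and integer ids
-- equal to a value held by more than one key, where which key A's merged-dict overwrite
-- returns is an accidental dict-reinsertion-order corner.
def Pre_get_subset_name_index (subset_id_dict : List (String × Int)) (grid_subset_id : String) : Prop :=
  (match PySem.Int.ofStr? grid_subset_id with
   | some n => (PySem.Dict.ofList subset_id_dict).values.count n == 1
   | none => (PySem.Dict.ofList subset_id_dict).keys.contains grid_subset_id) = true
instance (subset_id_dict : List (String × Int)) (grid_subset_id : String) : Decidable (Pre_get_subset_name_index subset_id_dict grid_subset_id) := by unfold Pre_get_subset_name_index; infer_instance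

def pvWitness_get_subset_name_index : (List (String × Int)) × String := ([("a", 1), ("b", 2)], "a")

def Spec_get_subset_name_index (subset_id_dict : List (String × Int)) (grid_subset_id : String) (out : String × Int) : Prop := out = get_subset_name_index_alt subset_id_dict grid_subset_id
instance (subset_id_dict : List (String × Int)) (grid_subset_id : String) (out : String × Int) : Decidable (Spec_get_subset_name_index subset_id_dict grid_subset_id out) := by unfold Spec_get_subset_name_index; infer_instance

-- ===== CLAIM (what is proved, stated in full; the proofs are below) =====
def Claim_equal_get_subset_name_index : Prop := ∀ (subset_id_dict : List (String × Int)) (grid_subset_id : String), Dom_get_subset_name_index subset_id_dict grid_subset_id → Pre_get_subset_name_index subset_id_dict grid_subset_id → Spec_get_subset_name_index subset_id_dict grid_subset_id (get_subset_name_index subset_id_dict grid_subset_id)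

-- ===== LEMMAS AND PROOFS =====

-- The reversed-dict fold's lookup is the reverse-scan find: the LAST key with the value wins.
theorem revfold_get? (l : List (String × Int)) (acc : PySem.Dict Int String) (n : Int) :
    (l.foldl (fun acc p => acc.insert p.2 p.1) acc).get? n =
      match l.reverse.find? (fun p => p.2 == n) with
      | some p => some p.1
      | none => acc.get? n := by
  induction l generalizing acc with
  | nil => simp
  | cons q t ih =>
    simp only [List.foldl_cons, List.reverse_cons, List.find?_append, ih]
    cases h : t.reverse.find? (fun p => p.2 == n) with
    | some p => simp
    | none =>
      simp only [Option.none_or, List.find?_cons, List.find?_nil]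
      rw [PySem.Dict.get?_insert]
      by_cases hq : n = q.2
      · simp [hq]
      · have hb : (q.2 == n) = false := beq_false_of_ne (Ne.symm hq)
        simp [hq, hb]

-- B's item scan is the first-match find of the value.
theorem pvScanItems_eq_find? (l : List (String × Int)) (n : Int) :
    pvScanItems l n = (l.find? (fun p => p.2 == n)).map Prod.fst := by
  induction l with
  | nil => simp [pvScanItems]
  | cons q t ih =>
    by_cases h : q.2 = n
    · simp [pvScanItems, h]
    · have hb : (q.2 == n) = false := beq_false_of_ne h
      simp [pvScanItems, h, hb, ih]

-- With a UNIQUE match, the first match and the last match coincide.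
theorem find?_reverse_of_unique {α : Type} (p : α → Bool) (l : List α)
    (h : (l.filter p).length = 1) : l.reverse.find? p = l.find? p := by
  induction l with
  | nil => simp at h
  | cons a t ih =>
    by_cases ha : p a
    · have hemp : t.filter p = [] := by simpa [ha] using h
      have htn : t.find? p = none := by
        rw [List.find?_eq_none]; intro x hx hpx
        have : x ∈ t.filter p := List.mem_filter.mpr ⟨hx, hpx⟩
        simp [hemp] at this
      have htr : t.reverse.find? p = none := by
        rw [List.find?_eq_none]; intro x hx hpx
        have : x ∈ t.filter p := List.mem_filter.mpr ⟨List.mem_reverse.mp hx, hpx⟩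
        simp [hemp] at this
      simp [List.find?_append, htr, ha]
    · have hb : p a = false := by simpa using ha
      have ht : (t.filter p).length = 1 := by simpa [List.filter_cons, hb] using h
      simp [List.find?_append, hb, ih ht]

-- A unique match exists: find? is some.
theorem find?_isSome_of_unique {α : Type} (p : α → Bool) (l : List α)
    (h : (l.filter p).length = 1) : (l.find? p).isSome := by
  cases hf : l.find? p with
  | some x => rfl
  | none =>
    rw [List.find?_eq_none] at hf
    have : l.filter p = [] := List.filter_eq_nil_iff.mpr (fun x hx => by simpa using hf x hx)
    simp [this] at h

-- count over values = filter length over items.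
theorem count_map_snd (l : List (String × Int)) (n : Int) :
    (l.map (fun p => p.2)).count n = (l.filter (fun p => p.2 == n)).length := by
  induction l with
  | nil => simp
  | cons q t ih => by_cases h : q.2 = n <;> simp [h, ih]

theorem values_count_eq_filter (d : PySem.Dict String Int) (n : Int) :
    d.values.count n = (d.items.filter (fun p => p.2 == n)).length := by
  have hv : d.values = d.items.map (fun p => p.2) := rfl
  rw [hv, count_map_snd]

-- ===== VERDICT (by name: the statement is the Claim_ definition above) =====
theorem get_subset_name_index_spec : Claim_equal_get_subset_name_index := by
  intro subset_id_dict grid_subset_id _ hpre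
  unfold Pre_get_subset_name_index at hpre
  unfold Spec_get_subset_name_index get_subset_name_index get_subset_name_index_alt
  cases hofs : PySem.Int.ofStr? grid_subset_id with
  | some n =>
    rw [hofs] at hpre
    have hcnt : ((PySem.Dict.ofList subset_id_dict).items.filter (fun p => p.2 == n)).length = 1 := by
      rw [← values_count_eq_filter]
      simpa using hpre
    simp only [revfold_get?, pvScanItems_eq_find?,
      find?_reverse_of_unique _ _ hcnt]
    cases hf : (PySem.Dict.ofList subset_id_dict).items.find? (fun p => p.2 == n) with
    | some q => simp
    | none => have := find?_isSome_of_unique _ _ hcnt; rw [hf] at this; simp at this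
  | none =>
    cases h : (PySem.Dict.ofList subset_id_dict).get? grid_subset_id with
    | some idx =>
      have hc : (PySem.Dict.ofList subset_id_dict).contains grid_subset_id = true := by
        rw [PySem.Dict.contains_eq_isSome_get?, h]; rfl
      simp [h, hc, PySem.Dict.getD_eq_get?_getD]
    | none =>
      have hc : (PySem.Dict.ofList subset_id_dict).contains grid_subset_id = false := by
        rw [PySem.Dict.contains_eq_isSome_get?, h]; rfl
      simp [h, hc]
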